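-- pv_equiv track=rewrite | github.com/omnimaster-ctrl/gratia-nailart | backend/routes/admin/clients.py | select_best_name
-- ===== SOURCE A (Python) =====
-- from collections import Counter
--
-- def normalize_name(name: str) -> str:
--     """Normalize name for better comparison."""
--     if not name:
--         return ""
--     normalized = name.strip().title()
--     normalized = ' '.join(normalized.split())
--     return normalized
--
-- def select_best_name(names: list) -> str:
--     """Select the best quality name from a list of name variations."""
--     if not names:
--         return "Cliente"
--
--     valid_names = [n.strip() for n in names if n and n.strip()]
--     if not valid_names:
--         return "Cliente"
--
--     normalized_counts = Counter()
--     name_examples = {}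
--
--     for name in valid_names:
--         normalized_key = normalize_name(name).lower()
--         normalized_counts[normalized_key] += 1
--         if normalized_key not in name_examples:
--             name_examples[normalized_key] = name
--         else:
--             existing = name_examples[normalized_key]
--             if name == name.title() and existing != existing.title():
--                 name_examples[normalized_key] = name
--
--     if not normalized_counts:
--         return "Cliente"
--
--     max_frequency = max(normalized_counts.values())
--     most_frequent = [name_examples[k] for k, v in normalized_counts.items() if v == max_frequency]
--
--     if len(most_frequent) == 1:
--         return most_frequent[0]
--
--     def score_name(name):
--         score = 0
--         normalized = name.strip()
--
--         if ' ' in normalized: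
--             score += 100
--         if normalized and normalized[0].isupper():
--             score += 50
--         if normalized == normalized.title():
--             score += 25
--         score += len(normalized)
--         if normalized.isupper():
--             score -= 20
--         if normalized.islower():
--             score -= 10
--
--         return score
--
--     scored_names = [(score_name(n), n) for n in most_frequent]
--     scored_names.sort(reverse=True, key=lambda x: x[0])
--
--     return scored_names[0][1]
-- ===== SOURCE B (Python) =====
-- def normalize_name(name: str) -> str:
--     """Normalize name for better comparison."""
--     if not name:
--         return ""
--     normalized = name.strip().title()
--     normalized = ' '.join(normalized.split())
--     return normalized
--
-- def score_name(name):
--     score = 0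
--     normalized = name.strip()
--     if ' ' in normalized:
--         score += 100
--     if normalized and normalized[0].isupper():
--         score += 50
--     if normalized == normalized.title():
--         score += 25
--     score += len(normalized)
--     if normalized.isupper():
--         score -= 20
--     if normalized.islower():
--         score -= 10
--     return score
--
-- def select_best_name(names: list) -> str:
--     """Select the best quality name from a list of name variations."""
--     if not names:
--         return "Cliente"
--
--     valid_names = [n.strip() for n in names if n and n.strip()]
--     if not valid_names:
--         return "Cliente"
--
--     # No dict/Counter: process each distinct normalized key once (first-occurrence
--     # order), gather its occurrences by a direct scan, pick the representative in
--     # closed form (first title-cased occurrence, else the first occurrence), and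
--     # keep the best key by a strict lexicographic (count, score) comparison.
--     keys = [normalize_name(n).lower() for n in valid_names]
--     best = None
--     for i, k in enumerate(keys):
--         if k in keys[:i]:
--             continue
--         occ = [n for n, kk in zip(valid_names, keys) if kk == k]
--         example = next((n for n in occ if n == n.title()), occ[0])
--         cand = (len(occ), score_name(example))
--         if best is None or cand > best[0]:
--             best = (cand, example)
--     return best[1]
-- ===== Notes on version B (the rewrite author's own statement) =====
-- stated objective: alternative
-- what changed: B drops the Counter/dict aggregation entirely: it walks the key list once, handles each distinct normalized key at its first occurrence by directly scanning out that key's occurrences, picks the representative in closed form (first title-cased occurrence, else the first occurrence) instead of A's incremental replacement rule, and keeps the winner with a running strict lexicographic (count, score) comparison instead of A's max-frequency filter plus reverse stable sort.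
import Mathlib
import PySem

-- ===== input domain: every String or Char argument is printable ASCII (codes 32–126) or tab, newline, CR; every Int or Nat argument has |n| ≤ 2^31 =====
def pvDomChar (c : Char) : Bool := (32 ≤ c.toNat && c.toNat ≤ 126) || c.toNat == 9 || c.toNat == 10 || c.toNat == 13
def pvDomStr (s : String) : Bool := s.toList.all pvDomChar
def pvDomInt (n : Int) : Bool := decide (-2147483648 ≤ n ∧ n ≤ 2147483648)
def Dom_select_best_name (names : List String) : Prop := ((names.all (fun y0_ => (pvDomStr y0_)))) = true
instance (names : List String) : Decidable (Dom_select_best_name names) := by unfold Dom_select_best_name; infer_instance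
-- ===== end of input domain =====

-- B replaces A's Counter + examples-dict + max-frequency filter + reverse sort by a dict-free
-- scan: each distinct key is handled at its first occurrence, its occurrences are gathered by a
-- direct scan, the representative is the first title-cased occurrence (else the first), and the
-- winner is kept by one running lexicographic (count, score) comparison (objective: alternative).

-- ===== PORT A =====
-- str.title(), hand-ported (PySem has no title); exact on ASCII, where the cased characters
-- are exactly the letters: a letter is uppercased after a non-letter and lowercased after a letter.
def titleChars : Bool → List Char → List Char
  | _, [] => []
  | prev, c :: rest =>
      (if prev then PySem.Chars.lowerChar c else PySem.Chars.upperChar c)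
        :: titleChars (PySem.Chars.isalpha c) rest

def pyTitle (s : String) : String := String.ofList (titleChars false s.toList)

-- str.isupper() / str.islower(), hand-ported (PySem has them only per character); exact on
-- ASCII: some cased character, and no cased character of the other case.
def strIsupper (s : String) : Bool :=
  s.toList.any PySem.Chars.isupper && !(s.toList.any PySem.Chars.islower)

def strIslower (s : String) : Bool :=
  s.toList.any PySem.Chars.islower && !(s.toList.any PySem.Chars.isupper)

def normalizeName (name : String) : String :=
  if name = "" then ""
  else
    let normalized := pyTitle (PySem.Str.strip name)
    PySem.Str.join " " (PySem.Str.split₀ normalized)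

def scoreName (name : String) : Int :=
  let normalized := PySem.Str.strip name
  let score : Int := 0
  let score := if PySem.Str.isIn " " normalized then score + 100 else score
  let score := if (match normalized.toList with
                   | [] => false
                   | c :: _ => PySem.Chars.isupper c) then score + 50 else score
  let score := if normalized = pyTitle normalized then score + 25 else score
  let score := score + PySem.Str.len normalized
  let score := if strIsupper normalized then score - 20 else score
  let score := if strIslower normalized then score - 10 else score
  score

def select_best_name (names : List String) : String :=
  if names = [] then "Cliente"
  else
    let valid_names := (names.filter (fun n => !(n == "") && !(PySem.Str.strip n == ""))).map PySem.Str.strip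
    if valid_names = [] then "Cliente"
    else
      let st := valid_names.foldl
        (fun (st : PySem.Dict String Int × PySem.Dict String String) name =>
          let key := PySem.Str.lower (normalizeName name)
          let counts := st.1.modify key 0 (· + 1)
          let examples :=
            match st.2.get? key with
            | none => st.2.insert key name
            | some existing =>
                if name = pyTitle name ∧ existing ≠ pyTitle existing then st.2.insert key name
                else st.2
          (counts, examples))
        (PySem.Dict.empty, PySem.Dict.empty)
      match PySem.List.max? st.1.values (fun v => v) with
      | none => "Cliente"
      | some max_frequency =>
          let most_frequent := (st.1.items.filter (fun kv => decide (kv.2 = max_frequency))).map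
            (fun kv => st.2.getD kv.1 "")
          if most_frequent.length = 1 then PySem.List.pyGetD most_frequent 0 ""
          else
            let scored := most_frequent.map (fun n => (scoreName n, n))
            (PySem.List.pyGetD (PySem.List.sorted scored (fun x => x.1) true) 0 (0, "")).2

-- ===== PORT B =====
-- 'cand > best[0]' (Python tuple comparison on int pairs) is ported as the explicit
-- lexicographic disjunction; 'k in keys[:i]' as contains over the slice.
def select_best_name_alt (names : List String) : String :=
  if names = [] then "Cliente"
  else
    let valid_names := (names.filter (fun n => !(n == "") && !(PySem.Str.strip n == ""))).map PySem.Str.strip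
    if valid_names = [] then "Cliente"
    else
      let keys := valid_names.map (fun n => PySem.Str.lower (normalizeName n))
      let best := (PySem.List.enumerate keys).foldl
        (fun (best : Option ((Int × Int) × String)) ik =>
          if (PySem.List.slice keys none (some ik.1)).contains ik.2 then best
          else
            let occ := ((valid_names.zip keys).filter (fun p => p.2 == ik.2)).map Prod.fst
            let exm :=
              match occ.find? (fun n => n == pyTitle n) with
              | some t => t
              | none => PySem.List.pyGetD occ 0 ""
            let cand : Int × Int := ((occ.length : Int), scoreName exm)
            match best with
            | none => some (cand, exm)
            | some be =>
                if cand.1 > be.1.1 ∨ (cand.1 = be.1.1 ∧ cand.2 > be.1.2) then some (cand, exm)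
                else some be)
        none
      match best with
      | none => "Cliente"
      | some be => be.2

-- ===== PRECONDITION & SPEC =====
def Spec_select_best_name (names : List String) (out : String) : Prop := out = select_best_name_alt names
instance (names : List String) (out : String) : Decidable (Spec_select_best_name names out) := by unfold Spec_select_best_name; infer_instance

-- ===== CLAIM (what is proved, stated in full; the proofs are below) =====
def Claim_equal_select_best_name : Prop := ∀ (names : List String), Dom_select_best_name names → Spec_select_best_name names (select_best_name names)

-- ===== LEMMAS AND PROOFS =====

-- proof-side bridge: the single dict key → (count, example) that A's two dicts decompose into
-- and whose items B's dict-free scan reproduces in closed form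
def aggStep (agg : PySem.Dict String (Int × String)) (name : String) : PySem.Dict String (Int × String) :=
  let key := PySem.Str.lower (normalizeName name)
  match agg.get? key with
  | none => agg.insert key (1, name)
  | some (count, existing) =>
      agg.insert key
        (count + 1, if name = pyTitle name ∧ existing ≠ pyTitle existing then name else existing)

-- closed forms matching B's scan
def dedupF (l : List String) : List String :=
  l.foldl (fun acc k => if k ∈ acc then acc else acc ++ [k]) []

def occOf (valid : List String) (k : String) : List String :=
  valid.filter (fun n => PySem.Str.lower (normalizeName n) == k)

def exOf (valid : List String) (k : String) : String :=
  match (occOf valid k).find? (fun n => n == pyTitle n) with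
  | some t => t
  | none => PySem.List.pyGetD (occOf valid k) 0 ""

def gOf (valid : List String) (k : String) : Int × String :=
  (((occOf valid k).length : Int), exOf valid k)

-- relation between A's pair of dicts (counts, examples) and the bridge dict agg:
-- componentwise projections of agg's items, with no duplicate keys
def RelAB (st : PySem.Dict String Int × PySem.Dict String String)
    (agg : PySem.Dict String (Int × String)) : Prop :=
  st.1.items = agg.items.map (fun kv => (kv.1, kv.2.1)) ∧
  st.2.items = agg.items.map (fun kv => (kv.1, kv.2.2)) ∧
  (agg.items.map Prod.fst).Nodup

lemma find?_of_mem_nodup {β : Type} {L : List (String × β)} {p : String × β}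
    (hnd : (L.map Prod.fst).Nodup) (hp : p ∈ L) :
    L.find? (fun q => q.1 == p.1) = some p := by
  induction L with
  | nil => cases hp
  | cons a t ih =>
    simp only [List.map_cons, List.nodup_cons] at hnd
    rcases List.mem_cons.1 hp with rfl | hmem
    · simp [List.find?]
    · have hne : a.1 ≠ p.1 := fun e => hnd.1 (e ▸ List.mem_map_of_mem hmem)
      have hb : (a.1 == p.1) = false := by simpa using hne
      simp only [List.find?_cons, hb]
      exact ih hnd.2 hmem

lemma stepAB' (st : PySem.Dict String Int × PySem.Dict String String)
    (agg : PySem.Dict String (Int × String)) (k name : String) (h : RelAB st agg) :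
    RelAB
      (let counts := st.1.modify k 0 (· + 1)
       let examples :=
         match st.2.get? k with
         | none => st.2.insert k name
         | some existing =>
             if name = pyTitle name ∧ existing ≠ pyTitle existing then st.2.insert k name
             else st.2
       (counts, examples))
      (match agg.get? k with
       | none => agg.insert k (1, name)
       | some (count, existing) =>
           agg.insert k
             (count + 1, if name = pyTitle name ∧ existing ≠ pyTitle existing then name else existing)) := by
  obtain ⟨h1, h2, hnd⟩ := h
  have hfind1 : st.1.items.find? (fun q => q.1 == k) =
      (agg.items.find? (fun q => q.1 == k)).map (fun kv => (kv.1, kv.2.1)) := by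
    rw [h1, List.find?_map]; rfl
  have hfind2 : st.2.items.find? (fun q => q.1 == k) =
      (agg.items.find? (fun q => q.1 == k)).map (fun kv => (kv.1, kv.2.2)) := by
    rw [h2, List.find?_map]; rfl
  have hcont1 : st.1.contains k = agg.contains k := by
    simp only [PySem.Dict.contains, h1, List.any_map]; rfl
  have hcont2 : st.2.contains k = agg.contains k := by
    simp only [PySem.Dict.contains, h2, List.any_map]; rfl
  cases hfind : agg.items.find? (fun q => q.1 == k) with
  | none =>
    have hget : agg.get? k = none := by simp [PySem.Dict.get?, hfind]
    have hget1 : st.1.get? k = none := by simp [PySem.Dict.get?, hfind1, hfind]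
    have hget2 : st.2.get? k = none := by simp [PySem.Dict.get?, hfind2, hfind]
    have hcont : agg.contains k = false := by
      simp only [PySem.Dict.contains]
      rw [List.any_eq_false]
      intro p hp
      exact List.find?_eq_none.mp hfind p hp
    refine ⟨?_, ?_, ?_⟩
    · simp only [hget, PySem.Dict.modify, PySem.Dict.getD, hget1, Option.getD_none,
        PySem.Dict.insert, hcont1, hcont, Bool.false_eq_true, if_false]
      simp [h1]
    · simp only [hget, hget2, PySem.Dict.insert, hcont2, hcont, Bool.false_eq_true, if_false]
      simp [h2]
    · simp only [hget, PySem.Dict.insert, hcont, Bool.false_eq_true, if_false]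
      simp only [List.map_append, List.map_cons, List.map_nil]
      rw [List.nodup_append]
      refine ⟨hnd, List.nodup_singleton _, ?_⟩
      intro a ha b hb
      rcases List.mem_singleton.1 hb with rfl
      obtain ⟨p, hp, hpk⟩ := List.mem_map.1 ha
      have hnp := List.find?_eq_none.mp hfind p hp
      simp only [beq_iff_eq] at hnp
      exact fun hak => hnp (by rw [hpk, hak])
  | some p =>
    have hpk : p.1 = k := by
      have := List.find?_some hfind
      simpa using this
    have hpmem : p ∈ agg.items := List.mem_of_find?_eq_some hfind
    have hget : agg.get? k = some p.2 := by simp [PySem.Dict.get?, hfind]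
    have hget1 : st.1.get? k = some p.2.1 := by simp [PySem.Dict.get?, hfind1, hfind]
    have hget2 : st.2.get? k = some p.2.2 := by simp [PySem.Dict.get?, hfind2, hfind]
    have hcont : agg.contains k = true := by
      simp only [PySem.Dict.contains]
      rw [List.any_eq_true]
      exact ⟨p, hpmem, by simpa using hpk⟩
    obtain ⟨k', c, e⟩ := p
    simp only at hget hget1 hget2
    subst hpk
    simp only [hget, hget2]
    set v' := if name = pyTitle name ∧ e ≠ pyTitle e then name else e with hv'
    refine ⟨?_, ?_, ?_⟩
    · simp only [PySem.Dict.modify, PySem.Dict.getD, hget1, Option.getD_some,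
        PySem.Dict.insert, hcont1, hcont, if_true, h1]
      rw [List.map_map, List.map_map]
      refine List.map_congr_left ?_
      intro q hq
      by_cases hqk : q.1 = k'
      · simp [Function.comp, hqk]
      · have hb : (q.1 == k') = false := by simpa using hqk
        simp [Function.comp, hb]
    · by_cases hcond : name = pyTitle name ∧ e ≠ pyTitle e
      · rw [if_pos hcond]
        have hv : v' = name := by rw [hv', if_pos hcond]
        simp only [PySem.Dict.insert, hcont2, hcont, if_true, h2]
        rw [List.map_map, List.map_map]
        refine List.map_congr_left ?_
        intro q hq
        by_cases hqk : q.1 = k'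
        · simp [Function.comp, hqk, hv]
        · have hb : (q.1 == k') = false := by simpa using hqk
          simp [Function.comp, hb]
      · rw [if_neg hcond]
        have hv : v' = e := by rw [hv', if_neg hcond]
        simp only [PySem.Dict.insert, hcont, if_true, h2, hv]
        rw [List.map_map]
        refine (List.map_congr_left ?_).symm
        intro q hq
        by_cases hqk : q.1 = k'
        · have h1q := find?_of_mem_nodup hnd hq
          rw [hqk] at h1q
          have heqq : q = (k', c, e) := Option.some.inj (h1q.symm.trans hfind)
          rw [heqq]
          simp [Function.comp]
        · have hb : (q.1 == k') = false := by simpa using hqk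
          simp [Function.comp, hb]
    · simp only [PySem.Dict.insert, hcont, if_true]
      rw [List.map_map]
      have hkeys : agg.items.map (Prod.fst ∘ fun q => if (q.1 == k') = true then (k', (c+1, v')) else q)
          = agg.items.map Prod.fst := by
        refine List.map_congr_left ?_
        intro q hq
        by_cases hqk : q.1 = k'
        · simp [Function.comp, hqk]
        · have hb : (q.1 == k') = false := by simpa using hqk
          simp [Function.comp, hb]
      rw [hkeys]
      exact hnd

lemma foldAB (valid : List String) (st : PySem.Dict String Int × PySem.Dict String String)
    (agg : PySem.Dict String (Int × String)) (h : RelAB st agg) :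
    RelAB
      (valid.foldl
        (fun (st : PySem.Dict String Int × PySem.Dict String String) name =>
          let key := PySem.Str.lower (normalizeName name)
          let counts := st.1.modify key 0 (· + 1)
          let examples :=
            match st.2.get? key with
            | none => st.2.insert key name
            | some existing =>
                if name = pyTitle name ∧ existing ≠ pyTitle existing then st.2.insert key name
                else st.2
          (counts, examples)) st)
      (valid.foldl aggStep agg) := by
  induction valid generalizing st agg with
  | nil => exact h
  | cons v rest ih =>
    exact ih _ _ (stepAB' st agg (PySem.Str.lower (normalizeName v)) v h)

-- head of a reverse sort is the first maximum
lemma head?_insertBy {α : Type} (before : α → α → Bool) (x : α) (l : List α) :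
    (PySem.List.insertBy before x l).head? =
      some (match l.head? with | none => x | some y => if before x y then x else y) := by
  cases l with
  | nil => rfl
  | cons y ys =>
    simp only [PySem.List.insertBy, List.head?_cons]
    split_ifs <;> simp_all

lemma head?_sorted_rev {α : Type} (xs : List α) (key : α → Int) :
    (PySem.List.sorted xs key true).head? = PySem.List.max? xs key := by
  unfold PySem.List.sorted PySem.List.max?
  simp only
  suffices h : ∀ (acc : List α),
      (List.foldl (fun acc x => PySem.List.insertBy (fun a b => decide (key b < key a)) x acc) acc xs).head?
      = List.foldl (fun acc x => match acc with
          | none => some x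
          | some m => if key m < key x then some x else some m) acc.head? xs by
    simpa using h []
  induction xs with
  | nil => intro acc; rfl
  | cons a t ih =>
    intro acc
    simp only [List.foldl_cons]
    rw [ih, head?_insertBy]
    cases acc with
    | nil => rfl
    | cons y ys => simp only [List.head?_cons]; split_ifs with h <;> simp_all

lemma max?_map {α β : Type} (l : List α) (g : α → β) (key : β → Int) :
    PySem.List.max? (l.map g) key = (PySem.List.max? l (fun a => key (g a))).map g := by
  unfold PySem.List.max?
  rw [List.foldl_map]
  suffices h : ∀ (acc : Option α),
      List.foldl (fun acc x => match acc with
        | none => some (g x)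
        | some m => if key m < key (g x) then some (g x) else some m) (acc.map g) l
      = (List.foldl (fun acc x => match acc with
        | none => some x
        | some m => if key (g m) < key (g x) then some x else some m) acc l).map g by
    simpa using h none
  induction l with
  | nil => intro acc; rfl
  | cons a t ih =>
    intro acc
    cases acc with
    | none => simpa using ih (some a)
    | some m =>
      simp only [List.foldl_cons, Option.map_some]
      by_cases hlt : key (g m) < key (g a)
      · rw [if_pos hlt, if_pos hlt]; exact ih (some a)
      · rw [if_neg hlt, if_neg hlt]; exact ih (some m)

lemma max?_append_singleton {α : Type} (l : List α) (x : α) (key : α → Int) :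
    PySem.List.max? (l ++ [x]) key =
      (match PySem.List.max? l key with
       | none => some x
       | some m => if key m < key x then some x else some m) := by
  unfold PySem.List.max?
  rw [List.foldl_append]
  rfl

lemma max2?_append_singleton {α : Type} (l : List α) (x : α) (k1 k2 : α → Int) :
    PySem.List.max2? (l ++ [x]) k1 k2 =
      (match PySem.List.max2? l k1 k2 with
       | none => some x
       | some m => if (decide (k1 m < k1 x) || (!decide (k1 x < k1 m) && decide (k2 m < k2 x))) then some x else some m) := by
  unfold PySem.List.max2?
  rw [List.foldl_append]
  rfl

-- the first lexicographic maximum is the first score-maximum among the elements of maximal count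
lemma max2?_eq_max?_filter {α : Type} (vs : List α) (k1 k2 : α → Int) (F : Int)
    (hF : PySem.List.max? (vs.map k1) (fun v => v) = some F) :
    PySem.List.max2? vs k1 k2 = PySem.List.max? (vs.filter (fun v => decide (k1 v = F))) k2 := by
  induction vs using List.reverseRecOn generalizing F with
  | nil => simp [PySem.List.max?] at hF
  | append_singleton vs x ih =>
    rcases List.eq_nil_or_concat' vs with rfl | hconcat
    · have hFx : F = k1 x := by
        simp [PySem.List.max?] at hF; omega
      subst hFx
      simp [PySem.List.max2?, PySem.List.max?]
    · have hvs : vs ≠ [] := by rcases hconcat with ⟨_, _, rfl⟩; simp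
      obtain ⟨F0, hF0⟩ : ∃ F0, PySem.List.max? (vs.map k1) (fun v => v) = some F0 := by
        cases h : PySem.List.max? (vs.map k1) (fun v => v) with
        | none => exact absurd (by simpa using (PySem.List.max?_eq_none_iff _ _).1 h) hvs
        | some m => exact ⟨m, rfl⟩
      have hmax : ∀ v ∈ vs, k1 v ≤ F0 := fun v hv =>
        PySem.List.max?_isMax hF0 _ (List.mem_map_of_mem hv)
      obtain ⟨m, hm⟩ : ∃ m, PySem.List.max? (vs.filter (fun v => decide (k1 v = F0))) k2 = some m := by
        cases h : PySem.List.max? (vs.filter (fun v => decide (k1 v = F0))) k2 with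
        | none =>
          exfalso
          have hnil := (PySem.List.max?_eq_none_iff _ _).1 h
          obtain ⟨v, hv, hvF⟩ : ∃ v ∈ vs, k1 v = F0 := by
            simpa using PySem.List.max?_mem hF0
          rw [List.filter_eq_nil_iff] at hnil
          exact hnil v hv (by simpa using hvF)
        | some m => exact ⟨m, rfl⟩
      have hmmem := PySem.List.max?_mem hm
      have hmF0 : k1 m = F0 := by
        have := List.of_mem_filter hmmem; simpa using this
      rw [List.map_append, List.map_singleton, max?_append_singleton, hF0] at hF
      rw [max2?_append_singleton, ih F0 hF0, hm, List.filter_append, List.filter_singleton]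
      by_cases hcase : F0 < k1 x
      · have hFeq : F = k1 x := by simp [hcase] at hF; omega
        subst hFeq
        have hfe : vs.filter (fun v => decide (k1 v = k1 x)) = [] := by
          rw [List.filter_eq_nil_iff]
          intro v hv
          have := hmax v hv
          simp only [decide_eq_true_eq]
          omega
        have hc : (decide (k1 m < k1 x) || (!decide (k1 x < k1 m) && decide (k2 m < k2 x))) = true := by
          simp only [Bool.or_eq_true, decide_eq_true_eq]
          left; omega
        simp only [hc, if_true, hfe, List.nil_append]
        simp [PySem.List.max?]
      · have hFeq : F = F0 := by simp [hcase] at hF; omega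
        subst hFeq
        by_cases heq : k1 x = F
        · have hpt : decide (k1 x = F) = true := by simpa using heq
          rw [hpt]
          show _ = PySem.List.max? (_ ++ [x]) k2
          rw [max?_append_singleton, hm]
          have h1 : ¬ (k1 m < k1 x) := by omega
          have h2 : ¬ (k1 x < k1 m) := by omega
          simp only [h1, decide_false, h2, Bool.not_false, Bool.false_or, Bool.true_and]
          by_cases h3 : k2 m < k2 x
          · simp [h3]
          · simp [h3]
        · have hpt : decide (k1 x = F) = false := by simpa using heq
          rw [hpt]
          have h2 : k1 x < k1 m := by
            rcases lt_trichotomy (k1 x) F with h | h | h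
            · omega
            · exact absurd h heq
            · omega
          have hc : (decide (k1 m < k1 x) || (!decide (k1 x < k1 m) && decide (k2 m < k2 x))) = false := by
            have h1 : ¬ (k1 m < k1 x) := by omega
            simp [h1, h2]
          simp only [hc, Bool.false_eq_true, if_false, Bool.cond_false, List.append_nil, hm]

-- A's tail (singleton shortcut or reverse sort) picks the first score-maximum
lemma a_tail_eq_max? (ns : List String) (m : String)
    (hm : PySem.List.max? ns scoreName = some m) :
    (if ns.length = 1 then PySem.List.pyGetD ns 0 ""
     else (PySem.List.pyGetD
        (PySem.List.sorted (ns.map fun n => (scoreName n, n)) (fun x => x.1) true) 0 (0, "")).2) = m := by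
  by_cases hlen : ns.length = 1
  · obtain ⟨a, rfl⟩ := List.length_eq_one_iff.1 hlen
    have hma : m = a := by
      simp [PySem.List.max?] at hm
      exact hm.symm
    rw [if_pos hlen, hma]
    simp [PySem.List.pyGetD_ofNat']
  · rw [if_neg hlen]
    have hhead : (PySem.List.sorted (ns.map fun n => (scoreName n, n)) (fun x => x.1) true).head?
        = some (scoreName m, m) := by
      rw [head?_sorted_rev, max?_map, hm]
      rfl
    cases hsort : PySem.List.sorted (ns.map fun n => (scoreName n, n)) (fun x => x.1) true with
    | nil => rw [hsort] at hhead; simp at hhead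
    | cons y t =>
      rw [hsort] at hhead
      simp only [List.head?_cons, Option.some.injEq] at hhead
      rw [PySem.List.pyGetD_ofNat']
      simp [hhead]

-- A's whole tail equals selecting by max2? over the bridge dict's values
lemma tails_eq (st : PySem.Dict String Int × PySem.Dict String String)
    (agg : PySem.Dict String (Int × String)) (h : RelAB st agg) :
    (match PySem.List.max? st.1.values (fun v => v) with
     | none => "Cliente"
     | some max_frequency =>
         let most_frequent := (st.1.items.filter (fun kv => decide (kv.2 = max_frequency))).map
           (fun kv => st.2.getD kv.1 "")
         if most_frequent.length = 1 then PySem.List.pyGetD most_frequent 0 ""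
         else
           let scored := most_frequent.map (fun n => (scoreName n, n))
           (PySem.List.pyGetD (PySem.List.sorted scored (fun x => x.1) true) 0 (0, "")).2)
    = (match PySem.List.max2? agg.values (fun cv => cv.1) (fun cv => scoreName cv.2) with
       | none => "Cliente"
       | some best => best.2) := by
  obtain ⟨h1, h2, hnd⟩ := h
  have hvals1 : st.1.values = agg.values.map (fun cv => cv.1) := by
    simp only [PySem.Dict.values, h1, List.map_map]; rfl
  rw [hvals1]
  cases hMF : PySem.List.max? (agg.values.map (fun cv => cv.1)) (fun v => v) with
  | none =>
    have : agg.values = [] := by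
      have := (PySem.List.max?_eq_none_iff _ _).1 hMF
      simpa using this
    rw [this]
    rfl
  | some F =>
    simp only
    rw [max2?_eq_max?_filter agg.values (fun cv => cv.1) (fun cv => scoreName cv.2) F hMF]
    obtain ⟨m, hm⟩ : ∃ m, PySem.List.max?
        (agg.values.filter (fun v => decide (v.1 = F))) (fun cv => scoreName cv.2) = some m := by
      cases h : PySem.List.max? (agg.values.filter (fun v => decide (v.1 = F))) (fun cv => scoreName cv.2) with
      | none =>
        exfalso
        have hnil := (PySem.List.max?_eq_none_iff _ _).1 h
        obtain ⟨v, hv, hvF⟩ : ∃ v ∈ agg.values, v.1 = F := by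
          simpa using PySem.List.max?_mem hMF
        rw [List.filter_eq_nil_iff] at hnil
        exact hnil v hv (by simpa using hvF)
      | some m => exact ⟨m, rfl⟩
    rw [hm]
    have hmf : (st.1.items.filter (fun kv => decide (kv.2 = F))).map (fun kv => st.2.getD kv.1 "")
        = (agg.values.filter (fun v => decide (v.1 = F))).map (fun cv => cv.2) := by
      simp only [PySem.Dict.values, h1, List.filter_map, List.map_map]
      refine List.map_congr_left ?_
      intro q hq
      have hqmem : q ∈ agg.items := List.mem_of_mem_filter hq
      have hfindq := find?_of_mem_nodup hnd hqmem
      have hget2 : st.2.get? q.1 = some q.2.2 := by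
        simp only [PySem.Dict.get?, h2, List.find?_map]
        have : agg.items.find? ((fun p => p.1 == q.1) ∘ fun kv => (kv.1, kv.2.2)) = some q := hfindq
        rw [this]
        rfl
      simp [Function.comp, PySem.Dict.getD, hget2]
    simp only
    rw [hmf]
    have := a_tail_eq_max? ((agg.values.filter (fun v => decide (v.1 = F))).map (fun cv => cv.2)) m.2 ?_
    · rw [this]
    · rw [max?_map, hm]
      rfl

-- ---------- closed form of the bridge dict: B's per-key scans ----------

lemma mem_foldl_dedup (l : List String) (acc : List String) (x : String) :
    x ∈ l.foldl (fun acc k => if k ∈ acc then acc else acc ++ [k]) acc ↔ x ∈ acc ∨ x ∈ l := by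
  induction l generalizing acc with
  | nil => simp
  | cons a t ih =>
    simp only [List.foldl_cons, ih]
    by_cases h : a ∈ acc
    · rw [if_pos h]
      constructor
      · rintro (h' | h') <;> simp_all
      · rintro (h' | h')
        · exact Or.inl h'
        · rcases List.mem_cons.1 h' with rfl | h'' <;> [exact Or.inl h; exact Or.inr h'']
    · rw [if_neg h]
      simp only [List.mem_append, List.mem_cons]
      tauto

lemma mem_dedupF (l : List String) (x : String) : x ∈ dedupF l ↔ x ∈ l := by
  unfold dedupF
  rw [mem_foldl_dedup]
  simp

lemma dedupF_append (l : List String) (x : String) :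
    dedupF (l ++ [x]) = if x ∈ l then dedupF l else dedupF l ++ [x] := by
  unfold dedupF
  rw [List.foldl_append]
  simp only [List.foldl_cons, List.foldl_nil]
  by_cases hx : x ∈ l
  · have h1 : x ∈ List.foldl (fun acc k => if k ∈ acc then acc else acc ++ [k]) [] l :=
      (mem_foldl_dedup l [] x).2 (Or.inr hx)
    rw [if_pos h1, if_pos hx]
  · have h1 : x ∉ List.foldl (fun acc k => if k ∈ acc then acc else acc ++ [k]) [] l := by
      intro h
      rcases (mem_foldl_dedup l [] x).1 h with h' | h'
      · simp at h'
      · exact hx h'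
    rw [if_neg h1, if_neg hx]

lemma find?_beq (L : List String) (k : String) :
    L.find? (fun a => a == k) = if k ∈ L then some k else none := by
  induction L with
  | nil => rfl
  | cons a t ih =>
    simp only [List.find?_cons]
    by_cases h : a = k
    · subst h; simp
    · have hb : (a == k) = false := by simpa using h
      rw [hb]
      simp only [List.mem_cons]
      rw [ih]
      by_cases hm : k ∈ t
      · simp [hm]
      · simp [hm, Ne.symm h]

lemma occOf_append (valid : List String) (x k : String) :
    occOf (valid ++ [x]) k
      = occOf valid k ++ (if (PySem.Str.lower (normalizeName x) == k) then [x] else []) := by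
  unfold occOf
  rw [List.filter_append]
  simp [List.filter_singleton]

lemma gOf_append_ne (valid : List String) (x k : String)
    (h : ¬ (PySem.Str.lower (normalizeName x) = k)) :
    gOf (valid ++ [x]) k = gOf valid k := by
  have hb : (PySem.Str.lower (normalizeName x) == k) = false := by simpa using h
  have hocc : occOf (valid ++ [x]) k = occOf valid k := by
    rw [occOf_append, hb]
    simp
  simp [gOf, exOf, hocc]

lemma agg_items (valid : List String) :
    (valid.foldl aggStep PySem.Dict.empty).items
      = (dedupF (valid.map (fun n => PySem.Str.lower (normalizeName n)))).map
          (fun k => (k, gOf valid k)) := by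
  induction valid using List.reverseRecOn with
  | nil => rfl
  | append_singleton valid x ih =>
    rw [List.foldl_append]
    simp only [List.foldl_cons, List.foldl_nil]
    set A := valid.foldl aggStep PySem.Dict.empty with hA
    set kx := PySem.Str.lower (normalizeName x) with hkx
    have hfind : A.items.find? (fun q => q.1 == kx)
        = if kx ∈ dedupF (valid.map (fun n => PySem.Str.lower (normalizeName n)))
          then some (kx, gOf valid kx) else none := by
      rw [ih, List.find?_map]
      have hco : ((fun (q : String × (Int × String)) => q.1 == kx) ∘ fun k => (k, gOf valid k))
          = fun k => k == kx := rfl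
      rw [hco, find?_beq]
      split_ifs <;> rfl
    have hmemiff : kx ∈ dedupF (valid.map (fun n => PySem.Str.lower (normalizeName n)))
        ↔ kx ∈ valid.map (fun n => PySem.Str.lower (normalizeName n)) := mem_dedupF _ _
    have hcont : A.contains kx
        = decide (kx ∈ dedupF (valid.map (fun n => PySem.Str.lower (normalizeName n)))) := by
      simp only [PySem.Dict.contains]
      by_cases hm : kx ∈ dedupF (valid.map (fun n => PySem.Str.lower (normalizeName n)))
      · simp only [hm, decide_true]
        rw [List.any_eq_true]
        exact ⟨(kx, gOf valid kx), by rw [ih]; exact List.mem_map_of_mem hm, by simp⟩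
      · simp only [hm, decide_false]
        rw [List.any_eq_false]
        intro p hp
        rw [ih] at hp
        obtain ⟨k, hk, rfl⟩ := List.mem_map.1 hp
        have hne : k ≠ kx := fun h => hm (h ▸ hk)
        simpa using hne
    rw [List.map_append]
    by_cases hmem : kx ∈ valid.map (fun n => PySem.Str.lower (normalizeName n))
    · -- key seen before: in-place update
      have hmemd := hmemiff.2 hmem
      have hget : A.get? kx = some (gOf valid kx) := by
        simp [PySem.Dict.get?, hfind, hmemd]
      have hoccne : occOf valid kx ≠ [] := by
        obtain ⟨n, hn, hkn⟩ := List.mem_map.1 hmem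
        intro hnil
        have : n ∈ occOf valid kx := by
          unfold occOf
          exact List.mem_filter.2 ⟨hn, by simpa using hkn⟩
        simp [hnil] at this
      have hocc : occOf (valid ++ [x]) kx = occOf valid kx ++ [x] := by
        rw [occOf_append, ← hkx]
        simp
      have hgx : gOf (valid ++ [x]) kx
          = ((gOf valid kx).1 + 1,
             if x = pyTitle x ∧ (gOf valid kx).2 ≠ pyTitle (gOf valid kx).2 then x
             else (gOf valid kx).2) := by
        obtain ⟨h0, rest, hrest⟩ : ∃ h0 rest, occOf valid kx = h0 :: rest := by
          cases hc : occOf valid kx with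
          | nil => exact absurd hc hoccne
          | cons h0 rest => exact ⟨h0, rest, rfl⟩
        have hlen : ((occOf (valid ++ [x]) kx).length : Int) = ((occOf valid kx).length : Int) + 1 := by
          rw [hocc]; simp
        cases hfo : (occOf valid kx).find? (fun n => n == pyTitle n) with
        | some t =>
          have ht : t = pyTitle t := by
            have := List.find?_some hfo
            simpa using this
          have hex : exOf valid kx = t := by simp [exOf, hfo]
          have hfo' : (occOf (valid ++ [x]) kx).find? (fun n => n == pyTitle n) = some t := by
            rw [hocc, List.find?_append, hfo]; rfl
          have hex' : exOf (valid ++ [x]) kx = t := by simp [exOf, hfo']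
          simp only [gOf, hex, hex', hlen]
          rw [if_neg (by simp [← ht])]
        | none =>
          have hnt : ∀ n ∈ occOf valid kx, ¬ (n = pyTitle n) := by
            intro n hn
            have := List.find?_eq_none.mp hfo n hn
            simpa using this
          have hex : exOf valid kx = h0 := by
            unfold exOf
            rw [hfo]
            show PySem.List.pyGetD (occOf valid kx) 0 "" = h0
            rw [PySem.List.pyGetD_zero, hrest]
            rfl
          have h0nt : ¬ (h0 = pyTitle h0) := hnt h0 (by rw [hrest]; exact List.mem_cons_self)
          by_cases hxt : x = pyTitle x
          · have hfo' : (occOf (valid ++ [x]) kx).find? (fun n => n == pyTitle n) = some x := by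
              rw [hocc, List.find?_append, hfo]
              simp [← hxt]
            have hex' : exOf (valid ++ [x]) kx = x := by simp [exOf, hfo']
            simp only [gOf, hex, hex', hlen]
            rw [if_pos ⟨hxt, h0nt⟩]
          · have hfo' : (occOf (valid ++ [x]) kx).find? (fun n => n == pyTitle n) = none := by
              rw [hocc, List.find?_append, hfo]
              simp [hxt]
            have hex' : exOf (valid ++ [x]) kx = h0 := by
              unfold exOf
              rw [hfo']
              show PySem.List.pyGetD (occOf (valid ++ [x]) kx) 0 "" = h0
              rw [PySem.List.pyGetD_zero, hocc, hrest]
              rfl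
            simp only [gOf, hex, hex', hlen]
            rw [if_neg (by tauto)]
      simp only [List.map_cons, List.map_nil]
      rw [dedupF_append, if_pos hmem]
      simp only [aggStep, ← hkx, hget, PySem.Dict.insert, hcont, hmemd, decide_true, if_true]
      rw [ih, List.map_map]
      refine List.map_congr_left ?_
      intro k hk
      by_cases hkkx : k = kx
      · subst hkkx
        simp only [Function.comp, beq_self_eq_true, if_true]
        rw [hgx]
      · have hb : (k == kx) = false := by simpa using hkkx
        simp only [Function.comp, hb, Bool.false_eq_true, if_false]
        rw [gOf_append_ne valid x k (fun h => hkkx (hkx.trans h).symm)]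
    · -- fresh key: appended at the end
      have hmemd : kx ∉ dedupF (valid.map (fun n => PySem.Str.lower (normalizeName n))) :=
        fun h => hmem (hmemiff.1 h)
      have hget : A.get? kx = none := by simp [PySem.Dict.get?, hfind, hmemd]
      have hoccnil : occOf valid kx = [] := by
        unfold occOf
        rw [List.filter_eq_nil_iff]
        intro n hn
        simp only [beq_iff_eq]
        intro h
        exact hmem (List.mem_map.2 ⟨n, hn, h⟩)
      have hgx : gOf (valid ++ [x]) kx = (1, x) := by
        have hocc : occOf (valid ++ [x]) kx = [x] := by
          rw [occOf_append, hoccnil, ← hkx]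
          simp
        simp only [gOf, exOf, hocc]
        cases hxt : ((x == pyTitle x) : Bool) <;>
          simp [List.find?, hxt, PySem.List.pyGetD_zero]
      simp only [List.map_cons, List.map_nil]
      rw [dedupF_append, if_neg hmem]
      simp only [aggStep, ← hkx, hget, PySem.Dict.insert, hcont, hmemd, decide_false,
        Bool.false_eq_true, if_false]
      rw [ih, List.map_append, List.map_singleton]
      congr 1
      · refine List.map_congr_left ?_
        intro k hk
        rw [gOf_append_ne]
        intro h
        exact hmem (hmemiff.1 (by rw [hkx.trans h]; exact hk))
      · rw [hgx]

-- B's occurrence scan over the zipped list is the filter occOf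
lemma zip_filter (valid : List String) (k : String) :
    (((valid.zip (valid.map (fun n => PySem.Str.lower (normalizeName n)))).filter
        (fun p => p.2 == k)).map Prod.fst)
      = occOf valid k := by
  induction valid with
  | nil => rfl
  | cons n t ih =>
    simp only [List.map_cons, List.zip_cons_cons, List.filter_cons]
    unfold occOf
    simp only [List.filter_cons]
    cases h : (PySem.Str.lower (normalizeName n) == k) <;>
      simp_all [occOf]

-- skipping indices whose key already occurred iterates exactly over the deduped key list
lemma foldl_enum_dedup {β : Type} (f : String → β → β) (l : List String) (b : β) :
    (PySem.List.enumerate l).foldl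
      (fun acc ik => if (PySem.List.slice l none (some ik.1)).contains ik.2 then acc
                     else f ik.2 acc) b
    = (dedupF l).foldl (fun acc k => f k acc) b := by
  induction l using List.reverseRecOn with
  | nil => rfl
  | append_singleton l x ih =>
    rw [PySem.List.enumerate_append, List.foldl_append]
    have hcong : (PySem.List.enumerate l).foldl
        (fun acc ik => if (PySem.List.slice (l ++ [x]) none (some ik.1)).contains ik.2 then acc
                       else f ik.2 acc) b
        = (PySem.List.enumerate l).foldl
          (fun acc ik => if (PySem.List.slice l none (some ik.1)).contains ik.2 then acc
                         else f ik.2 acc) b := by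
      apply PySem.List.foldl_congr_mem
      intro acc p hp
      obtain ⟨j, hj, rfl⟩ := (PySem.List.mem_enumerate_iff _ _ _).1 hp
      simp only [zero_add]
      rw [PySem.List.slice_to_natCast, PySem.List.slice_to_natCast,
        List.take_append_of_le_length (le_of_lt hj)]
    rw [hcong, ih]
    have henum : PySem.List.enumerate [x] (0 + (l.length : Int)) = [((l.length : Int), x)] := by
      simp [PySem.List.enumerate]
    rw [henum]
    simp only [List.foldl_cons, List.foldl_nil]
    rw [PySem.List.slice_to_natCast, List.take_append_of_le_length (le_refl _), List.take_length]
    rw [dedupF_append]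
    by_cases hx : x ∈ l
    · rw [if_pos hx]
      have hc : l.contains x = true := by simpa [List.contains_iff_mem] using hx
      rw [hc]
      simp
    · rw [if_neg hx]
      have hc : l.contains x = false := by
        simp only [Bool.eq_false_iff]
        intro h
        exact hx (by simpa [List.contains_iff_mem] using h)
      rw [hc]
      simp [List.foldl_append]

-- the generic skip lemma, specialized (by definitional equality) to B's loop body
lemma foldl_enum_dedup_spec (valid : List String) :
    (PySem.List.enumerate (valid.map (fun n => PySem.Str.lower (normalizeName n)))).foldl
      (fun (best : Option ((Int × Int) × String)) ik =>
        if (PySem.List.slice (valid.map (fun n => PySem.Str.lower (normalizeName n))) none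
            (some ik.1)).contains ik.2 then best
        else
          let occ := ((valid.zip (valid.map (fun n => PySem.Str.lower (normalizeName n)))).filter
            (fun p => p.2 == ik.2)).map Prod.fst
          let exm :=
            match occ.find? (fun n => n == pyTitle n) with
            | some t => t
            | none => PySem.List.pyGetD occ 0 ""
          let cand : Int × Int := ((occ.length : Int), scoreName exm)
          match best with
          | none => some (cand, exm)
          | some be =>
              if cand.1 > be.1.1 ∨ (cand.1 = be.1.1 ∧ cand.2 > be.1.2) then some (cand, exm)
              else some be)
      none
    = (dedupF (valid.map (fun n => PySem.Str.lower (normalizeName n)))).foldl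
      (fun (best : Option ((Int × Int) × String)) k =>
        let occ := ((valid.zip (valid.map (fun n => PySem.Str.lower (normalizeName n)))).filter
          (fun p => p.2 == k)).map Prod.fst
        let exm :=
          match occ.find? (fun n => n == pyTitle n) with
          | some t => t
          | none => PySem.List.pyGetD occ 0 ""
        let cand : Int × Int := ((occ.length : Int), scoreName exm)
        match best with
        | none => some (cand, exm)
        | some be =>
            if cand.1 > be.1.1 ∨ (cand.1 = be.1.1 ∧ cand.2 > be.1.2) then some (cand, exm)
            else some be)
      none :=
  foldl_enum_dedup
    (fun k (best : Option ((Int × Int) × String)) =>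
      let occ := ((valid.zip (valid.map (fun n => PySem.Str.lower (normalizeName n)))).filter
        (fun p => p.2 == k)).map Prod.fst
      let exm :=
        match occ.find? (fun n => n == pyTitle n) with
        | some t => t
        | none => PySem.List.pyGetD occ 0 ""
      let cand : Int × Int := ((occ.length : Int), scoreName exm)
      match best with
      | none => some (cand, exm)
      | some be =>
          if cand.1 > be.1.1 ∨ (cand.1 = be.1.1 ∧ cand.2 > be.1.2) then some (cand, exm)
          else some be)
    (valid.map (fun n => PySem.Str.lower (normalizeName n))) none

-- B's loop body, with the occurrence scan named (occOf/gOf), match/if form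
def bBody (valid : List String) (best : Option ((Int × Int) × String)) (k : String) :
    Option ((Int × Int) × String) :=
  match best with
  | none => some (((gOf valid k).1, scoreName (gOf valid k).2), (gOf valid k).2)
  | some be =>
      if (gOf valid k).1 > be.1.1 ∨ ((gOf valid k).1 = be.1.1 ∧ scoreName (gOf valid k).2 > be.1.2)
      then some (((gOf valid k).1, scoreName (gOf valid k).2), (gOf valid k).2)
      else some be

-- the max2? step specialized through gOf
def mBody (valid : List String) (acc : Option (Int × String)) (k : String) :
    Option (Int × String) :=
  match acc with
  | none => some (gOf valid k)
  | some m =>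
      if (decide (m.1 < (gOf valid k).1)
          || (!decide ((gOf valid k).1 < m.1)
              && decide (scoreName m.2 < scoreName (gOf valid k).2))) = true
      then some (gOf valid k) else some m

set_option maxHeartbeats 1000000 in
lemma bBodyZ_eq (valid : List String) (best : Option ((Int × Int) × String)) (k : String) :
    (let occ := ((valid.zip (valid.map (fun n => PySem.Str.lower (normalizeName n)))).filter
        (fun p => p.2 == k)).map Prod.fst
     let exm :=
       match occ.find? (fun n => n == pyTitle n) with
       | some t => t
       | none => PySem.List.pyGetD occ 0 ""
     let cand : Int × Int := ((occ.length : Int), scoreName exm)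
     match best with
     | none => some (cand, exm)
     | some be =>
         if cand.1 > be.1.1 ∨ (cand.1 = be.1.1 ∧ cand.2 > be.1.2) then some (cand, exm)
         else some be)
    = bBody valid best k := by
  rw [zip_filter]
  cases best with
  | none => rfl
  | some be =>
    simp only [bBody, gOf, exOf]

-- each running-comparison step mirrors the max2? step through the packing map
set_option maxHeartbeats 1000000 in
lemma step_eq (valid : List String) (k : String) (m0 : Option (Int × String)) :
    bBody valid (m0.map (fun m => ((m.1, scoreName m.2), m.2))) k
      = (mBody valid m0 k).map (fun m => ((m.1, scoreName m.2), m.2)) := by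
  cases m0 with
  | none => rfl
  | some m =>
    simp only [bBody, mBody, Option.map_some]
    split_ifs with h1 h2 h2
    · rfl
    · exfalso
      simp only [not_or, not_and, not_lt, Bool.or_eq_true, Bool.and_eq_true,
        Bool.not_eq_eq_eq_not, Bool.not_true, decide_eq_false_iff_not, decide_eq_true_eq,
        gt_iff_lt] at h1 h2
      obtain ⟨ha, hb⟩ := h2
      rcases h1 with h | ⟨he, hs⟩
      · omega
      · have := hb (by omega)
        omega
    · exfalso
      simp only [not_or, not_and, not_lt, Bool.or_eq_true, Bool.and_eq_true,
        Bool.not_eq_eq_eq_not, Bool.not_true, decide_eq_false_iff_not, decide_eq_true_eq,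
        gt_iff_lt] at h1 h2
      obtain ⟨ha, hb⟩ := h1
      rcases h2 with h | ⟨hle, hsc⟩
      · omega
      · have := hb (by omega)
        omega
    · rfl

-- the running strict (count, score) comparison computes the first lexicographic maximum
lemma bfold (valid : List String) (L : List String) (m0 : Option (Int × String)) :
    L.foldl (bBody valid) (m0.map (fun m => ((m.1, scoreName m.2), m.2)))
      = (L.foldl (mBody valid) m0).map (fun m => ((m.1, scoreName m.2), m.2)) := by
  induction L generalizing m0 with
  | nil => rfl
  | cons k t ih =>
    rw [List.foldl_cons, List.foldl_cons, step_eq]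
    exact ih (mBody valid m0 k)

-- B's tail equals selecting by max2? over the bridge dict's values
set_option maxHeartbeats 1000000 in
lemma b_side (valid : List String) :
    (match (PySem.List.enumerate (valid.map (fun n => PySem.Str.lower (normalizeName n)))).foldl
        (fun (best : Option ((Int × Int) × String)) ik =>
          if (PySem.List.slice (valid.map (fun n => PySem.Str.lower (normalizeName n))) none
              (some ik.1)).contains ik.2 then best
          else
            let occ := ((valid.zip (valid.map (fun n => PySem.Str.lower (normalizeName n)))).filter
              (fun p => p.2 == ik.2)).map Prod.fst
            let exm :=
              match occ.find? (fun n => n == pyTitle n) with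
              | some t => t
              | none => PySem.List.pyGetD occ 0 ""
            let cand : Int × Int := ((occ.length : Int), scoreName exm)
            match best with
            | none => some (cand, exm)
            | some be =>
                if cand.1 > be.1.1 ∨ (cand.1 = be.1.1 ∧ cand.2 > be.1.2) then some (cand, exm)
                else some be)
        none with
     | none => "Cliente"
     | some be => be.2)
    = (match PySem.List.max2? ((valid.foldl aggStep PySem.Dict.empty).values)
          (fun cv => cv.1) (fun cv => scoreName cv.2) with
       | none => "Cliente"
       | some best => best.2) := by
  have hvals : (valid.foldl aggStep PySem.Dict.empty).values
      = (dedupF (valid.map (fun n => PySem.Str.lower (normalizeName n)))).map (gOf valid) := by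
    simp only [PySem.Dict.values, agg_items, List.map_map]
    rfl
  rw [hvals]
  rw [foldl_enum_dedup_spec valid]
  have hbody : (dedupF (valid.map (fun n => PySem.Str.lower (normalizeName n)))).foldl
      (fun (best : Option ((Int × Int) × String)) k =>
        let occ := ((valid.zip (valid.map (fun n => PySem.Str.lower (normalizeName n)))).filter
          (fun p => p.2 == k)).map Prod.fst
        let exm :=
          match occ.find? (fun n => n == pyTitle n) with
          | some t => t
          | none => PySem.List.pyGetD occ 0 ""
        let cand : Int × Int := ((occ.length : Int), scoreName exm)
        match best with
        | none => some (cand, exm)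
        | some be =>
            if cand.1 > be.1.1 ∨ (cand.1 = be.1.1 ∧ cand.2 > be.1.2) then some (cand, exm)
            else some be)
      none
      = (dedupF (valid.map (fun n => PySem.Str.lower (normalizeName n)))).foldl
          (bBody valid) none := by
    apply PySem.List.foldl_congr_mem
    intro acc x hx
    exact bBodyZ_eq valid acc x
  rw [hbody]
  have hfold := bfold valid (dedupF (valid.map (fun n => PySem.Str.lower (normalizeName n)))) none
  simp only [Option.map_none] at hfold
  rw [hfold]
  have hmax2 : PySem.List.max2?
      ((dedupF (valid.map (fun n => PySem.Str.lower (normalizeName n)))).map (gOf valid))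
      (fun cv => cv.1) (fun cv => scoreName cv.2)
      = (dedupF (valid.map (fun n => PySem.Str.lower (normalizeName n)))).foldl
          (mBody valid) none := by
    unfold PySem.List.max2?
    rw [List.foldl_map]
    apply PySem.List.foldl_congr_mem
    intro acc x hx
    cases acc with
    | none => rfl
    | some m => rfl
  rw [hmax2]
  cases (dedupF (valid.map (fun n => PySem.Str.lower (normalizeName n)))).foldl
      (mBody valid) none with
  | none => rfl
  | some m => rfl

-- both tails, with the valid-names list abstracted
set_option maxHeartbeats 1000000 in
lemma main_tail (valid : List String) :
    (if valid = [] then "Cliente"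
     else
       match PySem.List.max?
           (valid.foldl
             (fun (st : PySem.Dict String Int × PySem.Dict String String) name =>
               let key := PySem.Str.lower (normalizeName name)
               let counts := st.1.modify key 0 (· + 1)
               let examples :=
                 match st.2.get? key with
                 | none => st.2.insert key name
                 | some existing =>
                     if name = pyTitle name ∧ existing ≠ pyTitle existing then st.2.insert key name
                     else st.2
               (counts, examples))
             (PySem.Dict.empty, PySem.Dict.empty)).1.values (fun v => v) with
       | none => "Cliente"
       | some max_frequency =>
           let most_frequent := (((valid.foldl
               (fun (st : PySem.Dict String Int × PySem.Dict String String) name =>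
                 let key := PySem.Str.lower (normalizeName name)
                 let counts := st.1.modify key 0 (· + 1)
                 let examples :=
                   match st.2.get? key with
                   | none => st.2.insert key name
                   | some existing =>
                       if name = pyTitle name ∧ existing ≠ pyTitle existing then st.2.insert key name
                       else st.2
                 (counts, examples))
               (PySem.Dict.empty, PySem.Dict.empty)).1.items.filter
                 (fun kv => decide (kv.2 = max_frequency))).map
             (fun kv => (valid.foldl
               (fun (st : PySem.Dict String Int × PySem.Dict String String) name =>
                 let key := PySem.Str.lower (normalizeName name)
                 let counts := st.1.modify key 0 (· + 1)
                 let examples :=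
                   match st.2.get? key with
                   | none => st.2.insert key name
                   | some existing =>
                       if name = pyTitle name ∧ existing ≠ pyTitle existing then st.2.insert key name
                       else st.2
                 (counts, examples))
               (PySem.Dict.empty, PySem.Dict.empty)).2.getD kv.1 ""))
           if most_frequent.length = 1 then PySem.List.pyGetD most_frequent 0 ""
           else
             let scored := most_frequent.map (fun n => (scoreName n, n))
             (PySem.List.pyGetD (PySem.List.sorted scored (fun x => x.1) true) 0 (0, "")).2)
    = (if valid = [] then "Cliente"
       else
         match (PySem.List.enumerate (valid.map (fun n => PySem.Str.lower (normalizeName n)))).foldl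
             (fun (best : Option ((Int × Int) × String)) ik =>
               if (PySem.List.slice (valid.map (fun n => PySem.Str.lower (normalizeName n))) none
                   (some ik.1)).contains ik.2 then best
               else
                 let occ := ((valid.zip (valid.map (fun n => PySem.Str.lower (normalizeName n)))).filter
                   (fun p => p.2 == ik.2)).map Prod.fst
                 let exm :=
                   match occ.find? (fun n => n == pyTitle n) with
                   | some t => t
                   | none => PySem.List.pyGetD occ 0 ""
                 let cand : Int × Int := ((occ.length : Int), scoreName exm)
                 match best with
                 | none => some (cand, exm)
                 | some be =>
                     if cand.1 > be.1.1 ∨ (cand.1 = be.1.1 ∧ cand.2 > be.1.2) then some (cand, exm)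
                     else some be)
             none with
         | none => "Cliente"
         | some be => be.2) := by
  by_cases h1 : valid = []
  · rw [if_pos h1, if_pos h1]
  · rw [if_neg h1, if_neg h1]
    exact (tails_eq _ _ (foldAB valid (PySem.Dict.empty, PySem.Dict.empty) PySem.Dict.empty ⟨rfl, rfl, List.nodup_nil⟩)).trans (b_side valid).symm

-- ===== VERDICT (by name: the statement is the Claim_ definition above) =====
set_option maxHeartbeats 2000000 in
theorem select_best_name_spec : Claim_equal_select_best_name := by
  intro names _
  show select_best_name names = select_best_name_alt names
  unfold select_best_name select_best_name_alt
  by_cases h0 : names = []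
  · rw [if_pos h0, if_pos h0]
  · rw [if_neg h0, if_neg h0]
    exact main_tail ((names.filter (fun n => !(n == "") && !(PySem.Str.strip n == ""))).map PySem.Str.strip)
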